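-- pv_equiv track=rewrite | github.com/hocaoglumf/Operations-Research | CPM_Matrix.py | GoForward
-- ===== SOURCE A (Python) =====
-- def GoForward(M):
--     row=[0]
--
--     for i in range(1,len(M[0])):
--         tpl_aux=[]
--         for j in range(i):
--             if (M[j][i]==-1):
--                 t=-9999999999
--             else:
--                 t=M[j][i]
--             tpl_aux.append(t + row[j])
--
--         row.append(max(tpl_aux))
--
--     column=[row[len(row)-1]]
--     return row,row[len(row)-1]
-- ===== SOURCE B (Python) =====
-- def GoForward(M):
--     n = len(M[0])
--     row = [0] + [None] * (n - 1)
--     for j in range(n):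
--         base = row[j]
--         for i in range(j + 1, n):
--             t = M[j][i]
--             if t == -1:
--                 t = -9999999999
--             cand = t + base
--             if row[i] is None or cand > row[i]:
--                 row[i] = cand
--     res = [x for x in row]
--     return res, res[-1]
-- ===== Notes on version B (the rewrite author's own statement) =====
-- stated objective: alternative
-- what changed: Replaces the pull-style pass (for each node, build the list of all predecessor candidates and take max()) by a push/relaxation pass over sources: a single running maximum per node (initialized None) is relaxed in place, transposing the loop nest and removing the per-node candidate list and max() call.
import Mathlib
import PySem

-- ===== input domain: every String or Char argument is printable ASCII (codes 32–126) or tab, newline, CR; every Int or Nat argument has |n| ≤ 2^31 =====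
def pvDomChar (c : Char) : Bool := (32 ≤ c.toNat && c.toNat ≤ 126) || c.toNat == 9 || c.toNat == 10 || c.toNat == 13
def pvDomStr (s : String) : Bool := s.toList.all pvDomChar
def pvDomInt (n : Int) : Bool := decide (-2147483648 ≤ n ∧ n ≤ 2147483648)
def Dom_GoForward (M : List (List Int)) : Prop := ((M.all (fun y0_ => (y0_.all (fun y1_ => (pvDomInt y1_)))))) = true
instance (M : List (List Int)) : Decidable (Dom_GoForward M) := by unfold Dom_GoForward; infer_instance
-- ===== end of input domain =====

-- B replaces A's pull-and-max pass by an in-place push/relaxation pass over sources (alternative decomposition, same cost).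

-- ===== PORT A =====
-- literal transliteration of Source A: row=[0]; for i in range(1,len(M[0])): build tpl_aux, append max(tpl_aux)
def GoForward (M : List (List Int)) : List Int × Int :=
  let n := (M.headD []).length
  let row := (List.range' 1 (n - 1)).foldl (fun row i =>
    let tpl := (List.range i).foldl (fun acc j =>
      let v := (M.getD j []).getD i 0     -- M[j][i]; in range under Pre_
      let t := if v = -1 then (-9999999999 : Int) else v
      acc ++ [t + row.getD j 0]) ([] : List Int)
    row ++ [(PySem.List.max? tpl (fun x => x)).getD 0]) [0]
  (row, row.getD (row.length - 1) 0)

-- ===== PORT B =====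
-- literal transliteration of Source B: row = [0] + [None]*(n-1); relax row[i] from each source j
def GoForward_alt (M : List (List Int)) : List Int × Int :=
  let n := (M.headD []).length
  let row := (List.range n).foldl (fun row j =>
    let base := (row.getD j none).getD 0  -- row[j]; always set here under Pre_
    (List.range' (j + 1) (n - (j + 1))).foldl (fun row i =>
      let t0 := (M.getD j []).getD i 0    -- M[j][i]; in range under Pre_
      let t := if t0 = -1 then (-9999999999 : Int) else t0
      let cand := t + base
      match row.getD i none with
      | none => row.set i (some cand)
      | some v => if cand > v then row.set i (some cand) else row) row)
    (some 0 :: List.replicate (n - 1) none)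
  let res := row.map (fun x => x.getD 0)
  (res, res.getD (res.length - 1) 0)

-- ===== PRECONDITION & SPEC =====
-- Pre_: exactly the inputs where A returns (M nonempty, and every row read by the pass is long enough);
-- elsewhere A raises IndexError (M=[]) or IndexError on a short row.
def Pre_GoForward (M : List (List Int)) : Prop :=
  M ≠ [] ∧ ∀ j, j < (M.headD []).length - 1 →
    j < M.length ∧ (M.headD []).length ≤ (M.getD j []).length
instance (M : List (List Int)) : Decidable (Pre_GoForward M) := by unfold Pre_GoForward; infer_instance
def pvWitness_GoForward : List (List Int) := [[0, 3], [0, 0]]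

def Spec_GoForward (M : List (List Int)) (out : List Int × Int) : Prop := out = GoForward_alt M
instance (M : List (List Int)) (out : List Int × Int) : Decidable (Spec_GoForward M out) := by unfold Spec_GoForward; infer_instance

-- ===== CLAIM (what is proved, stated in full; the proofs are below) =====
def Claim_equal_GoForward : Prop := ∀ (M : List (List Int)), Dom_GoForward M → Pre_GoForward M → Spec_GoForward M (GoForward M)

-- ===== LEMMAS AND PROOFS =====

-- weight of edge j -> i, with A's -1 sentinel rule
def pvWt (M : List (List Int)) (j i : Nat) : Int :=
  let v := (M.getD j []).getD i 0
  if v = -1 then (-9999999999 : Int) else v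

-- max of a nonempty list, Python-style (0 for [] — never reached)
def pvMk : List Int → Int
  | [] => 0
  | x :: t => t.foldl max x

-- the row A builds, after entries 1..k have been produced
def pvRowSpec (M : List (List Int)) : Nat → List Int
  | 0 => [0]
  | k+1 =>
    let r := pvRowSpec M k
    r ++ [pvMk ((List.range (k+1)).map (fun j => pvWt M j (k+1) + r.getD j 0))]

-- final value of node i
def pvF (M : List (List Int)) (i : Nat) : Int := (pvRowSpec M i).getD i 0

-- optional running max over sources j < k relaxing node i (B's cell state)
def pvPm (M : List (List Int)) (k i : Nat) : Option Int :=
  (List.range k).foldl (fun acc j =>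
    match acc with
    | none => some (pvWt M j i + pvF M j)
    | some v => some (max v (pvWt M j i + pvF M j))) none


-- length of A's row
theorem pvRowSpec_length (M : List (List Int)) (k : Nat) : (pvRowSpec M k).length = k + 1 := by
  induction k with
  | zero => rfl
  | succ k ih => simp [pvRowSpec, ih]

-- prefix stability of A's row
theorem pvRowSpec_getD (M : List (List Int)) (k i : Nat) (h : i ≤ k) :
    (pvRowSpec M k).getD i 0 = pvF M i := by
  induction k with
  | zero => interval_cases i; rfl
  | succ k ih =>
    rcases Nat.lt_or_ge i (k+1) with hi | hi
    · rw [← ih (by omega)]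
      simp only [pvRowSpec]
      rw [List.getD_eq_getElem?_getD, List.getD_eq_getElem?_getD,
        List.getElem?_append_left (by rw [pvRowSpec_length]; omega)]
    · have : i = k + 1 := by omega
      subst this
      rfl

-- A's row is the table of final node values
theorem pvRowSpec_eq_map (M : List (List Int)) (k : Nat) :
    pvRowSpec M k = (List.range (k+1)).map (pvF M) := by
  apply List.ext_getElem
  · simp [pvRowSpec_length]
  · intro i h1 h2
    have hi : i ≤ k := by simpa [pvRowSpec_length] using h1
    have := pvRowSpec_getD M k i hi
    rw [List.getD_eq_getElem?_getD, List.getElem?_eq_getElem h1] at this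
    simpa using this

-- unfolding of pvF at a successor
theorem pvF_succ (M : List (List Int)) (k : Nat) :
    pvF M (k+1) = pvMk ((List.range (k+1)).map (fun j => pvWt M j (k+1) + pvF M j)) := by
  have hlen : (pvRowSpec M k).length = k + 1 := pvRowSpec_length M k
  have : pvF M (k+1)
      = pvMk ((List.range (k+1)).map (fun j => pvWt M j (k+1) + (pvRowSpec M k).getD j 0)) := by
    simp only [pvF, pvRowSpec]
    rw [List.getD_eq_getElem?_getD, List.getElem?_append_right (by omega)]
    simp [hlen]
  rw [this]
  congr 1
  apply List.map_congr_left
  intro j hj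
  rw [pvRowSpec_getD M k j (by simpa using Nat.lt_succ_iff.mp (List.mem_range.mp hj))]

-- Python max(list) as the head-seeded fold
theorem pvMax?_getD (l : List Int) : (PySem.List.max? l (fun x => x)).getD 0 = pvMk l := by
  cases l with
  | nil => simp [PySem.List.max?, pvMk]
  | cons x t => rw [PySem.List.max?_id_cons]; rfl

-- A's outer loop builds pvRowSpec
theorem A_loop (M : List (List Int)) (k : Nat) :
    (List.range' 1 k).foldl (fun row i =>
      row ++ [(PySem.List.max? ((List.range i).foldl (fun acc j =>
        acc ++ [(if (M.getD j []).getD i 0 = -1 then (-9999999999 : Int) else (M.getD j []).getD i 0)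
          + row.getD j 0]) ([] : List Int)) (fun x => x)).getD 0]) [0] = pvRowSpec M k := by
  induction k with
  | zero => rfl
  | succ k ih =>
    rw [List.range'_concat, List.foldl_append, ih]
    simp only [List.foldl_cons, List.foldl_nil]
    rw [PySem.List.foldl_append_singleton_eq_map, pvMax?_getD]
    have h1 : 1 + 1 * k = k + 1 := by omega
    rw [h1]
    simp [pvRowSpec, pvWt]

-- one relaxation step of the running max
theorem pvPm_succ (M : List (List Int)) (k i : Nat) :
    pvPm M (k+1) i = match pvPm M k i with
      | none => some (pvWt M k i + pvF M k)
      | some v => some (max v (pvWt M k i + pvF M k)) := by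
  simp only [pvPm, List.range_succ, List.foldl_append, List.foldl_cons, List.foldl_nil]

-- the option fold is the head-seeded fold
theorem pvOptFold (l : List Int) (x : Int) :
    l.foldl (fun acc y =>
      match acc with
      | none => some y
      | some v => some (max v y)) (some x) = some (l.foldl max x) := by
  induction l generalizing x with
  | nil => rfl
  | cons y t ih => simp only [List.foldl_cons]; exact ih (max x y)

theorem pvPm_eq (M : List (List Int)) (k i : Nat) :
    pvPm M k i = match (List.range k).map (fun j => pvWt M j i + pvF M j) with
      | [] => none
      | x :: t => some (t.foldl max x) := by
  have : pvPm M k i = ((List.range k).map (fun j => pvWt M j i + pvF M j)).foldl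
      (fun acc y => match acc with
        | none => some y
        | some v => some (max v y)) none := by
    rw [List.foldl_map]; rfl
  rw [this]
  cases h : (List.range k).map (fun j => pvWt M j i + pvF M j) with
  | nil => rfl
  | cons x t => simp only [List.foldl_cons]; exact pvOptFold t x

-- after all its sources have pushed, a node holds its final value
theorem pvPm_self (M : List (List Int)) (i : Nat) (h : 1 ≤ i) :
    pvPm M i i = some (pvF M i) := by
  obtain ⟨k, rfl⟩ := Nat.exists_eq_add_of_le h
  simp only [Nat.add_comm 1 k]
  rw [pvPm_eq, pvF_succ]
  cases hc : (List.range (k+1)).map (fun j => pvWt M j (k+1) + pvF M j) with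
  | nil => simp at hc
  | cons x t => rfl

-- B's cell state after the first k sources have pushed
def pvEntry (M : List (List Int)) (k i : Nat) : Option Int :=
  if i ≤ k then some (pvF M i) else pvPm M k i

theorem pvSet_map_range {α : Type} (n i : Nat) (f : Nat → α) (v : α) (_h : i < n) :
    ((List.range n).map f).set i v = (List.range n).map (fun j => if j = i then v else f j) := by
  apply List.ext_getElem
  · simp
  · intro j h1 h2
    simp only [List.getElem_set, List.getElem_map, List.getElem_range]
    by_cases hji : i = j
    · simp [hji]
    · simp [hji]
      omega

theorem pvGetD_map_range {α : Type} (n i : Nat) (f : Nat → α) (d : α) (h : i < n) :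
    ((List.range n).map f).getD i d = f i := by
  rw [List.getD_eq_getElem?_getD, List.getElem?_eq_getElem (by simpa using h)]
  simp

-- mixed state during source k's inner push: indices < s already relaxed by k
def pvMix (M : List (List Int)) (k s i : Nat) : Option Int :=
  if i < s then pvEntry M (k+1) i else pvEntry M k i

theorem pvEntry_succ_of_lt (M : List (List Int)) (k s : Nat) (h : k < s) :
    pvEntry M (k+1) s = match pvPm M k s with
      | none => some (pvWt M k s + pvF M k)
      | some v => some (max v (pvWt M k s + pvF M k)) := by
  rw [← pvPm_succ]
  unfold pvEntry
  rcases Nat.lt_or_ge k (s - 1) with hk | hk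
  · rw [if_neg (by omega)]
  · have : s = k + 1 := by omega
    subst this
    rw [if_pos (by omega), pvPm_self M (k+1) (by omega)]

-- the inner (push) loop of source k over indices s..n-1
theorem B_inner (M : List (List Int)) (n k : Nat) :
    ∀ (t s : Nat), k < s → s + t = n →
    (List.range' s t).foldl (fun r i =>
      match r.getD i none with
      | none => r.set i (some ((if (M.getD k []).getD i 0 = -1 then (-9999999999 : Int) else (M.getD k []).getD i 0) + pvF M k))
      | some v =>
        if (if (M.getD k []).getD i 0 = -1 then (-9999999999 : Int) else (M.getD k []).getD i 0) + pvF M k > v then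
          r.set i (some ((if (M.getD k []).getD i 0 = -1 then (-9999999999 : Int) else (M.getD k []).getD i 0) + pvF M k))
        else r)
      ((List.range n).map (pvMix M k s)) = (List.range n).map (pvMix M k n) := by
  have hw : ∀ i : Nat, (if (M.getD k []).getD i 0 = -1 then (-9999999999 : Int) else (M.getD k []).getD i 0) = pvWt M k i := fun _ => rfl
  intro t
  induction t with
  | zero => intro s hks hsn; rw [List.range'_zero, List.foldl_nil, Nat.add_zero] at *; rw [hsn]
  | succ t ih =>
    intro s hks hsn
    have hs : s < n := by omega
    rw [List.range'_succ, List.foldl_cons]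
    simp only [hw] at ih ⊢
    have hget : ((List.range n).map (pvMix M k s)).getD s none = pvPm M k s := by
      rw [pvGetD_map_range n s _ none hs]
      simp only [pvMix, pvEntry, if_neg (lt_irrefl s), if_neg (by omega : ¬ s ≤ k)]
    rw [hget]
    have hmix : ∀ w : Option Int, pvEntry M (k+1) s = w →
        ((List.range n).map (fun i => if i = s then w else pvMix M k s i))
          = (List.range n).map (pvMix M k (s+1)) := by
      intro w hwv
      apply List.map_congr_left
      intro i _
      by_cases hi : i = s
      · subst hi; rw [if_pos rfl, pvMix, if_pos (by omega), hwv]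
      · rw [if_neg hi]
        simp only [pvMix]
        by_cases h2 : i < s
        · rw [if_pos h2, if_pos (by omega)]
        · rw [if_neg h2, if_neg (by omega)]
    have hstep := pvEntry_succ_of_lt M k s hks
    cases hc : pvPm M k s with
    | none =>
      rw [hc] at hstep
      simp only [] at hstep ⊢
      rw [pvSet_map_range n s _ _ hs, hmix _ hstep]
      exact ih (s+1) (by omega) (by omega)
    | some v =>
      rw [hc] at hstep
      simp only [] at hstep ⊢
      by_cases hgt : pvWt M k s + pvF M k > v
      · rw [if_pos hgt, pvSet_map_range n s _ _ hs,
          hmix _ (by rw [hstep, max_eq_right (le_of_lt hgt)]),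
          ih (s+1) (by omega) (by omega)]
      · rw [if_neg hgt]
        have : (List.range n).map (pvMix M k s) = (List.range n).map (pvMix M k (s+1)) := by
          have := hmix (some v) (by rw [hstep, max_eq_left (by omega)])
          rw [← this]
          apply List.map_congr_left
          intro i _
          by_cases hi : i = s
          · rw [if_pos hi, hi]
            simp only [pvMix, if_neg (lt_irrefl s), pvEntry, if_neg (by omega : ¬ s ≤ k)]
            exact hc
          · rw [if_neg hi]
        rw [this]
        exact ih (s+1) (by omega) (by omega)

-- the initial row is the state before any source has pushed
theorem B_init (M : List (List Int)) (n : Nat) (hn : 1 ≤ n) :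
    (some (0:Int) :: List.replicate (n-1) none) = (List.range n).map (pvEntry M 0) := by
  apply List.ext_getElem
  · simp; omega
  · intro i h1 h2
    cases i with
    | zero =>
      simp only [List.getElem_cons_zero, List.getElem_map, List.getElem_range]
      simp [pvEntry, pvF, pvRowSpec]
    | succ i =>
      simp only [List.getElem_cons_succ, List.getElem_map, List.getElem_range]
      rw [List.getElem_replicate]
      simp only [pvEntry, if_neg (by omega : ¬ i + 1 ≤ 0)]
      rfl

-- B's outer loop: after the first k sources have pushed, the state is pvEntry k
theorem B_loop (M : List (List Int)) (n : Nat) (hn : 1 ≤ n) :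
    ∀ k, k ≤ n →
    (List.range k).foldl (fun row j =>
      (List.range' (j+1) (n - (j+1))).foldl (fun r i =>
        match r.getD i none with
        | none => r.set i (some ((if (M.getD j []).getD i 0 = -1 then (-9999999999 : Int) else (M.getD j []).getD i 0) + (row.getD j none).getD 0))
        | some v =>
          if (if (M.getD j []).getD i 0 = -1 then (-9999999999 : Int) else (M.getD j []).getD i 0) + (row.getD j none).getD 0 > v then
            r.set i (some ((if (M.getD j []).getD i 0 = -1 then (-9999999999 : Int) else (M.getD j []).getD i 0) + (row.getD j none).getD 0))
          else r) row)
      (some 0 :: List.replicate (n-1) none)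
    = (List.range n).map (pvEntry M k) := by
  intro k
  induction k with
  | zero => intro _; rw [List.range_zero, List.foldl_nil]; exact B_init M n hn
  | succ k ih =>
    intro hk
    rw [List.range_succ, List.foldl_append, List.foldl_cons, List.foldl_nil, ih (by omega)]
    have hbase : ((((List.range n).map (pvEntry M k)).getD k none).getD 0) = pvF M k := by
      rw [pvGetD_map_range n k _ none (by omega)]
      simp [pvEntry]
    rw [hbase]
    have hstart : (List.range n).map (pvEntry M k) = (List.range n).map (pvMix M k (k+1)) := by
      apply List.map_congr_left
      intro i _
      simp only [pvMix]
      by_cases hi : i < k + 1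
      · rw [if_pos hi]
        simp only [pvEntry, if_pos (by omega : i ≤ k), if_pos (by omega : i ≤ k + 1)]
      · rw [if_neg hi]
    rw [hstart, B_inner M n k (n - (k+1)) (k+1) (by omega) (by omega)]
    apply List.map_congr_left
    intro i hi
    rw [pvMix, if_pos (List.mem_range.mp hi)]

theorem GoForward_spec : Claim_equal_GoForward := by
  intro M _ _
  unfold Spec_GoForward
  simp only [GoForward, GoForward_alt]
  rcases Nat.eq_zero_or_pos (M.headD []).length with hn | hn
  · rw [hn]; simp
  · set n := (M.headD []).length with hndef
    rw [A_loop M (n-1), B_loop M n hn n (le_refl n)]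
    have hres : (List.map (fun x => x.getD 0) ((List.range n).map (pvEntry M n))) = pvRowSpec M (n-1) := by
      rw [List.map_map, pvRowSpec_eq_map, Nat.sub_add_cancel hn]
      apply List.map_congr_left
      intro i hi
      simp only [Function.comp, pvEntry, if_pos (le_of_lt (List.mem_range.mp hi))]
      rfl
    rw [hres, pvRowSpec_length, Nat.succ_sub_one,
      pvRowSpec_getD M (n-1) (n-1) (le_refl _)]
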